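-- pv_equiv track=rewrite | github.com/JustGitEverything/JustRepository | jl_compiler.py | is_r_trivial
-- ===== SOURCE A (Python) =====
-- OPERATORS = ["+", "-"]
--
-- def only_func(funcs, lb):
--     lin = lb.strip()
--
--     if lin.find("(") == -1:
--         return False
--
--     for fu in funcs:
--         if lin.startswith(fu):
--
--             rst = lin[lin.find("(") + 1:-1]
--
--             if not ("(" in rst or ")" in rst or "+" in rst or "-" in rst or "<<" in rst or ">>" in rst):
--                 return True
--
--     return False
--
-- def is_r_trivial(lb, vrs, fnc):
--     lin = lb.strip()
--
--     if lin.isdigit() or lin in vrs or lin == "" or only_func(fnc, lin):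
--         return True
--
--     if lin[0] == "(" and lin[-1] == ")":
--         return is_r_trivial(lin[1:-1], vrs, fnc)
--
--     no_op = lin[1:].strip()
--
--     if (lin[0] == "+") and is_r_trivial(no_op, vrs, fnc):
--         return True
--
--     if lin[0] in OPERATORS:
--         i_t = no_op
--
--         if no_op[0] == "(" and no_op[-1] == ")":
--             i_t = no_op[1:-1].strip()
--
--         if i_t.isdigit() or i_t in vrs or i_t == "" or only_func(fnc, i_t):
--             return True
--
--     return False
-- ===== SOURCE B (Python) =====
-- OPERATORS = ["+", "-"]
--
-- def only_func(funcs, lb):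
--     lin = lb.strip()
--
--     if lin.find("(") == -1:
--         return False
--
--     for fu in funcs:
--         if lin.startswith(fu):
--
--             rst = lin[lin.find("(") + 1:-1]
--
--             if not ("(" in rst or ")" in rst or "+" in rst or "-" in rst or "<<" in rst or ">>" in rst):
--                 return True
--
--     return False
--
-- def _simple(lin, vrs, fnc):
--     return lin.isdigit() or lin in vrs or lin == "" or only_func(fnc, lin)
--
-- def is_r_trivial(lb, vrs, fnc):
--     lin = lb.strip()
--     while True:
--         if _simple(lin, vrs, fnc):
--             return True
--         if lin.startswith("(") and lin.endswith(")"):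
--             lin = lin[1:-1].strip()
--             continue
--         rest = lin[1:].strip()
--         if lin.startswith("+"):
--             lin = rest
--             continue
--         if lin.startswith("-") and rest != "":
--             if rest.startswith("(") and rest.endswith(")"):
--                 rest = rest[1:-1].strip()
--             return _simple(rest, vrs, fnc)
--         return False
-- ===== Notes on version B (the rewrite author's own statement) =====
-- stated objective: simpler
-- what changed: Replaced A's recursion by a single while-loop that keeps stripping outer parentheses and leading '+' signs (dropping A's redundant single-level '+' fallback, which the deep recursion subsumes) and does the one-level '-' check inline with a shared _simple helper.
-- outside the precondition, e.g. on is_r_trivial('+-+', [], []): A returns False, B returns False; on is_r_trivial('-', ['-'], []): A returns True, B returns True; on is_r_trivial('-', [], []): A raises IndexError, B returns False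
import Mathlib
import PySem

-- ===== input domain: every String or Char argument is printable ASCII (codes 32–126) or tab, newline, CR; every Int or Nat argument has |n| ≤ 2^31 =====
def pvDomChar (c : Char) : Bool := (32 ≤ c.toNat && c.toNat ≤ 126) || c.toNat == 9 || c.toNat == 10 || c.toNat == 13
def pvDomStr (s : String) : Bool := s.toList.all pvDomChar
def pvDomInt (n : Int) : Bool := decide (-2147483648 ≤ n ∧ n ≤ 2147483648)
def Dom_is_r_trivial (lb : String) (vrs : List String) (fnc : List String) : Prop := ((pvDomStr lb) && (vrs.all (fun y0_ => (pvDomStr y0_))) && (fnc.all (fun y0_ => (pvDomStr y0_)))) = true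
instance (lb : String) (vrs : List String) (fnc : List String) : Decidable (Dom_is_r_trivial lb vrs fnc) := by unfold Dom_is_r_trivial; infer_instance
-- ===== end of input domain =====

-- B rewrites A's recursion as a single while-loop (stripping outer parens / leading '+' signs, one-level '-' check inline,
-- dropping A's redundant single-level '+' fallback); equal on Pre_, which excludes the inputs where A raises IndexError.

-- termination lemmas for the ports (cited in decreasing_by)
theorem pv_strip_length_le (l : List Char) : (PySem.Chars.strip l).length ≤ l.length := by
  simp only [PySem.Chars.strip, PySem.Chars.lstrip, PySem.Chars.rstrip]
  calc (List.dropWhile PySem.Chars.isspace (List.dropWhile PySem.Chars.isspace l).reverse).reverse.length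
      = (List.dropWhile PySem.Chars.isspace (List.dropWhile PySem.Chars.isspace l).reverse).length := by simp
    _ ≤ (List.dropWhile PySem.Chars.isspace l).reverse.length := List.length_dropWhile_le _ _
    _ = (List.dropWhile PySem.Chars.isspace l).length := by simp
    _ ≤ l.length := List.length_dropWhile_le _ _

theorem pv_slice_one_length_lt (l : List Char) (b : Option Int) (h : l ≠ []) :
    (PySem.List.slice l (some 1) b).length < l.length := by
  have hl : 1 ≤ l.length := List.length_pos_iff.mpr h
  have ha : PySem.List.clampIdx l.length 1 = 1 := by
    simp [PySem.List.clampIdx]; omega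
  have h2 : (PySem.List.slice l (some 1) b).length ≤ (l.drop 1).length := by
    simp only [PySem.List.slice, ha]
    cases b <;> simp [List.length_take]
  have h3 : (l.drop 1).length = l.length - 1 := by simp
  omega

-- ===== PORT A =====
-- shared helper: only_func is textually identical in Source A and Source B
def only_func_go (funcs : List String) (lin : List Char) : Bool :=
  match funcs with
  | [] => false
  | fu :: rest =>
      (PySem.Chars.startswith lin fu.toList &&
        (let rst := PySem.List.slice lin (some (PySem.Chars.find lin ['('] + 1)) (some (-1))
         !(PySem.Chars.isIn ['('] rst || PySem.Chars.isIn [')'] rst || PySem.Chars.isIn ['+'] rst ||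
           PySem.Chars.isIn ['-'] rst || PySem.Chars.isIn ['<','<'] rst || PySem.Chars.isIn ['>','>'] rst)))
      || only_func_go rest lin

def only_func (funcs : List String) (lb : List Char) : Bool :=
  let lin := PySem.Chars.strip lb
  if PySem.Chars.find lin ['('] == -1 then false
  else only_func_go funcs lin

def pvOPERATORS : List Char := ['+', '-']

-- A's inline test `lin.isdigit() or lin in vrs or lin == "" or only_func(fnc, lin)`
def pvTrivA (vrs fnc : List String) (lin : List Char) : Bool :=
  PySem.Chars.strIsdigit lin || (vrs.map String.toList).contains lin || lin.isEmpty || only_func fnc lin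

def is_r_trivial_core (vrs fnc : List String) (lb : List Char) : Bool :=
  let lin := PySem.Chars.strip lb
  if _h : pvTrivA vrs fnc lin then true
  else
    match PySem.List.pyGet? lin 0 with
    | none => false          -- unreachable: lin == "" already returned True
    | some c0 =>
      if c0 == '(' && (PySem.List.pyGet? lin (-1) == some ')') then
        is_r_trivial_core vrs fnc (PySem.List.slice lin (some 1) (some (-1)))
      else
        let no_op := PySem.Chars.strip (PySem.List.slice lin (some 1) none)
        if c0 == '+' && is_r_trivial_core vrs fnc no_op then true
        else if pvOPERATORS.contains c0 then
          match PySem.List.pyGet? no_op 0 with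
          | none => false    -- Python raises IndexError here; these inputs are outside Pre_
          | some d0 =>
            let i_t := if d0 == '(' && (PySem.List.pyGet? no_op (-1) == some ')') then
                         PySem.Chars.strip (PySem.List.slice no_op (some 1) (some (-1)))
                       else no_op
            if pvTrivA vrs fnc i_t then true else false
        else false
termination_by lb.length
decreasing_by
  · have h1 : PySem.Chars.strip lb ≠ [] := by
      intro e
      have _h2 : ¬ pvTrivA vrs fnc (PySem.Chars.strip lb) = true := _h
      rw [e] at _h2; simp [pvTrivA] at _h2
    calc (PySem.List.slice (PySem.Chars.strip lb) (some 1) (some (-1))).length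
        < (PySem.Chars.strip lb).length := pv_slice_one_length_lt _ _ h1
      _ ≤ lb.length := pv_strip_length_le lb
  · have h1 : PySem.Chars.strip lb ≠ [] := by
      intro e
      have _h2 : ¬ pvTrivA vrs fnc (PySem.Chars.strip lb) = true := _h
      rw [e] at _h2; simp [pvTrivA] at _h2
    calc (PySem.Chars.strip (PySem.List.slice (PySem.Chars.strip lb) (some 1) none)).length
        ≤ (PySem.List.slice (PySem.Chars.strip lb) (some 1) none).length := pv_strip_length_le _
      _ < (PySem.Chars.strip lb).length := pv_slice_one_length_lt _ _ h1
      _ ≤ lb.length := pv_strip_length_le lb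

def is_r_trivial (lb : String) (vrs : List String) (fnc : List String) : Bool :=
  is_r_trivial_core vrs fnc lb.toList

-- ===== PORT B =====
-- Source B's while-loop (Source B's `_simple` is the same test as A's inline one, so pvTrivA serves both ports), one recursive call per iteration
def alt_loop (vrs fnc : List String) (lin : List Char) : Bool :=
  if h : pvTrivA vrs fnc lin then true
  else if PySem.Chars.startswith lin ['('] && PySem.Chars.endswith lin [')'] then
    alt_loop vrs fnc (PySem.Chars.strip (PySem.List.slice lin (some 1) (some (-1))))
  else
    let rest := PySem.Chars.strip (PySem.List.slice lin (some 1) none)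
    if PySem.Chars.startswith lin ['+'] then
      alt_loop vrs fnc rest
    else if PySem.Chars.startswith lin ['-'] && !rest.isEmpty then
      (if PySem.Chars.startswith rest ['('] && PySem.Chars.endswith rest [')'] then
         pvTrivA vrs fnc (PySem.Chars.strip (PySem.List.slice rest (some 1) (some (-1))))
       else pvTrivA vrs fnc rest)
    else false
termination_by lin.length
decreasing_by
  · have h1 : lin ≠ [] := by rintro rfl; simp [pvTrivA] at h
    calc (PySem.Chars.strip (PySem.List.slice lin (some 1) (some (-1)))).length
        ≤ (PySem.List.slice lin (some 1) (some (-1))).length := pv_strip_length_le _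
      _ < lin.length := pv_slice_one_length_lt _ _ h1
  · have h1 : lin ≠ [] := by rintro rfl; simp [pvTrivA] at h
    calc (PySem.Chars.strip (PySem.List.slice lin (some 1) none)).length
        ≤ (PySem.List.slice lin (some 1) none).length := pv_strip_length_le _
      _ < lin.length := pv_slice_one_length_lt _ _ h1

def is_r_trivial_alt (lb : String) (vrs : List String) (fnc : List String) : Bool :=
  alt_loop vrs fnc (PySem.Chars.strip lb.toList)

-- ===== PRECONDITION & SPEC =====
-- Pre_ excludes the lines made only of '(' ')' '+' '-' and whitespace with exactly one '-': on those A can reduce the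
-- line to a bare "-" and raise IndexError (e.g. "-", "(-)"); the remaining such lines A merely answers without raising.
def pvInS (c : Char) : Bool := PySem.Chars.isspace c || c == '(' || c == ')' || c == '+' || c == '-'
def pvBad (l : List Char) : Bool := l.all pvInS && (l.count '-' == 1)
def Pre_is_r_trivial (lb : String) (vrs : List String) (fnc : List String) : Prop :=
  pvBad lb.toList = false
instance (lb : String) (vrs : List String) (fnc : List String) : Decidable (Pre_is_r_trivial lb vrs fnc) := by
  unfold Pre_is_r_trivial; infer_instance
def pvWitness_is_r_trivial : String × List String × List String := ("x1", ["x1"], [])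

def Spec_is_r_trivial (lb : String) (vrs : List String) (fnc : List String) (out : Bool) : Prop := out = is_r_trivial_alt lb vrs fnc
instance (lb : String) (vrs : List String) (fnc : List String) (out : Bool) : Decidable (Spec_is_r_trivial lb vrs fnc out) := by unfold Spec_is_r_trivial; infer_instance

-- ===== CLAIM (what is proved, stated in full; the proofs are below) =====
def Claim_equal_is_r_trivial : Prop := ∀ (lb : String) (vrs : List String) (fnc : List String), Dom_is_r_trivial lb vrs fnc → Pre_is_r_trivial lb vrs fnc → Spec_is_r_trivial lb vrs fnc (is_r_trivial lb vrs fnc)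

-- ===== LEMMAS AND PROOFS =====


theorem pv_dropWhile_idem (p : Char → Bool) (x : List Char) :
    List.dropWhile p (List.dropWhile p x) = List.dropWhile p x := by
  rw [List.dropWhile_eq_self_iff]
  intro hl
  have w : List.dropWhile p x ≠ [] := by
    intro e; rw [e] at hl; simp at hl
  have := List.head_dropWhile_not p w
  rw [List.head_eq_getElem] at this
  simp [this]

theorem pv_strip_head (l : List Char) (hl : 0 < (PySem.Chars.strip l).length) :
    PySem.Chars.isspace ((PySem.Chars.strip l)[0]) = false := by
  have hpre : PySem.Chars.strip l <+: PySem.Chars.lstrip l := by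
    rw [PySem.Chars.strip, PySem.Chars.rstrip]
    rw [← List.reverse_reverse (PySem.Chars.lstrip l)]
    exact (List.reverse_prefix).mpr (by simpa using List.dropWhile_suffix (l := (PySem.Chars.lstrip l).reverse) PySem.Chars.isspace)
  have hlen : 0 < (PySem.Chars.lstrip l).length := lt_of_lt_of_le hl hpre.length_le
  have hw : PySem.Chars.lstrip l ≠ [] := by intro e; rw [e] at hlen; simp at hlen
  have h0 : (PySem.Chars.strip l)[0] = (PySem.Chars.lstrip l)[0] := hpre.getElem hl
  rw [h0]
  have := List.head_dropWhile_not PySem.Chars.isspace (l := l) (by simpa [PySem.Chars.lstrip] using hw)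
  rw [List.head_eq_getElem] at this
  simpa [PySem.Chars.lstrip] using this

theorem pv_strip_idem (l : List Char) :
    PySem.Chars.strip (PySem.Chars.strip l) = PySem.Chars.strip l := by
  have h1 : PySem.Chars.lstrip (PySem.Chars.strip l) = PySem.Chars.strip l := by
    rw [PySem.Chars.lstrip, List.dropWhile_eq_self_iff]
    intro hl
    simp [pv_strip_head l hl]
  conv_lhs => rw [PySem.Chars.strip, h1]
  conv_lhs => rw [show PySem.Chars.strip l = PySem.Chars.rstrip (PySem.Chars.lstrip l) from rfl,
    PySem.Chars.rstrip, PySem.Chars.rstrip, List.reverse_reverse, pv_dropWhile_idem]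
  rfl

theorem pv_strip_decomp (l : List Char) :
    ∃ u v, l = u ++ PySem.Chars.strip l ++ v ∧ (∀ c ∈ u, PySem.Chars.isspace c = true) ∧
      (∀ c ∈ v, PySem.Chars.isspace c = true) := by
  refine ⟨List.takeWhile PySem.Chars.isspace l,
    (List.takeWhile PySem.Chars.isspace (PySem.Chars.lstrip l).reverse).reverse, ?_, ?_, ?_⟩
  · have h2 : PySem.Chars.lstrip l = PySem.Chars.strip l ++
        (List.takeWhile PySem.Chars.isspace (PySem.Chars.lstrip l).reverse).reverse := by
      have h0 := List.takeWhile_append_dropWhile (p := PySem.Chars.isspace)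
        (l := (PySem.Chars.lstrip l).reverse)
      have h1 := congrArg List.reverse h0
      simp only [List.reverse_append, List.reverse_reverse] at h1
      rw [show PySem.Chars.strip l = PySem.Chars.rstrip (PySem.Chars.lstrip l) from rfl,
        PySem.Chars.rstrip]
      exact h1.symm
    conv_lhs => rw [← List.takeWhile_append_dropWhile (p := PySem.Chars.isspace) (l := l)]
    conv_lhs => rw [show List.dropWhile PySem.Chars.isspace l = PySem.Chars.lstrip l from rfl, h2]
    rw [List.append_assoc]
  · intro c hc; exact List.mem_takeWhile_imp hc
  · intro c hc; exact List.mem_takeWhile_imp (by simpa using hc)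

theorem pv_strip_reverse (l : List Char) : (PySem.Chars.strip l).reverse =
    List.dropWhile PySem.Chars.isspace (PySem.Chars.lstrip l).reverse := by
  rw [show PySem.Chars.strip l = PySem.Chars.rstrip (PySem.Chars.lstrip l) from rfl, PySem.Chars.rstrip,
    List.reverse_reverse]

theorem pv_strip_getLast?_not (l : List Char) (c : Char) (h : (PySem.Chars.strip l).getLast? = some c) :
    PySem.Chars.isspace c = false := by
  rw [List.getLast?_eq_head?_reverse, pv_strip_reverse] at h
  have w : List.dropWhile PySem.Chars.isspace (PySem.Chars.lstrip l).reverse ≠ [] := by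
    intro e; rw [e] at h; simp at h
  have h3 := List.head_dropWhile_not PySem.Chars.isspace w
  rw [List.head?_eq_some_head w] at h
  rw [← Option.some_inj.mp h]
  exact h3

theorem pv_strip_ne_nil (l : List Char) (c : Char) (h : l.getLast? = some c)
    (hl : PySem.Chars.isspace c = false) : PySem.Chars.strip l ≠ [] := by
  have hmem : c ∈ l := List.mem_of_getLast? h
  have h1 : PySem.Chars.lstrip l ≠ [] := by
    intro e
    have := (List.dropWhile_eq_nil_iff).mp e _ hmem
    rw [hl] at this; exact Bool.false_ne_true this
  have h2 : (PySem.Chars.lstrip l).getLast? = some c := by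
    obtain ⟨t, ht⟩ : PySem.Chars.lstrip l <:+ l := List.dropWhile_suffix _
    rw [← ht] at h
    rwa [List.getLast?_append_of_ne_nil t h1] at h
  intro e
  have er : (PySem.Chars.strip l).reverse = [] := by rw [e]; rfl
  rw [pv_strip_reverse] at er
  have hm : c ∈ (PySem.Chars.lstrip l).reverse := by
    rw [List.mem_reverse]; exact List.mem_of_getLast? h2
  have := (List.dropWhile_eq_nil_iff).mp er c hm
  rw [hl] at this; exact Bool.false_ne_true this

theorem pv_slice_cons (c : Char) (t : List Char) :
    PySem.List.slice (c :: t) (some 1) (some (-1)) = t.dropLast := by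
  simp [PySem.List.slice, PySem.List.clampIdx]
  rcases t with _ | ⟨d, t⟩
  · simp
  · simp only [List.length_cons]
    rw [if_neg (by push_cast; omega)]
    rw [List.dropLast_eq_take]
    simp

theorem pv_slice_one_none (l : List Char) : PySem.List.slice l (some 1) none = l.drop 1 := by
  rcases l with _ | ⟨c, t⟩
  · simp [PySem.List.slice, PySem.List.clampIdx]
  · simp [PySem.List.slice, PySem.List.clampIdx]

theorem pv_startswith_cons (c x : Char) (t : List Char) :
    PySem.Chars.startswith (c :: t) [x] = (c == x) := by
  simp [PySem.Chars.startswith, List.isPrefixOf, eq_comm]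

theorem pv_endswith_getLast? (l : List Char) (x : Char) :
    PySem.Chars.endswith l [x] = (l.getLast? == some x) := by
  simp only [PySem.Chars.endswith, List.isSuffixOf, List.reverse_singleton]
  rw [List.getLast?_eq_head?_reverse]
  cases hr : l.reverse with
  | nil => simp [List.isPrefixOf]
  | cons c t => simp [List.isPrefixOf, eq_comm]

theorem pv_bad_extend (u m v : List Char) (hu : ∀ c ∈ u, pvInS c = true ∧ c ≠ '-')
    (hv : ∀ c ∈ v, pvInS c = true ∧ c ≠ '-') (hm : pvBad m = true) :
    pvBad (u ++ m ++ v) = true := by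
  simp only [pvBad, List.all_append, List.count_append, Bool.and_eq_true, List.all_eq_true,
    beq_iff_eq] at *
  refine ⟨⟨⟨fun c hc => (hu c hc).1, hm.1⟩, fun c hc => (hv c hc).1⟩, ?_⟩
  have cu : u.count '-' = 0 := List.count_eq_zero.mpr (fun hc => (hu _ hc).2 rfl)
  have cv : v.count '-' = 0 := List.count_eq_zero.mpr (fun hc => (hv _ hc).2 rfl)
  omega

theorem pv_getLast?_cons (c : Char) (t : List Char) (h : t ≠ []) :
    (c :: t).getLast? = t.getLast? := by
  simp [List.getLast?_cons, Option.getD]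
  cases ht : t.getLast? with
  | none => exact absurd (List.getLast?_eq_none_iff.mp ht) h
  | some a => rfl

theorem pv_space_side (c : Char) (h : PySem.Chars.isspace c = true) : pvInS c = true ∧ c ≠ '-' := by
  refine ⟨by simp [pvInS, h], ?_⟩
  rintro rfl
  simp [PySem.Chars.isspace] at h

theorem pv_bad_strip (l : List Char) (h : pvBad (PySem.Chars.strip l) = true) : pvBad l = true := by
  obtain ⟨u, v, hd, hu, hv⟩ := pv_strip_decomp l
  rw [hd]
  exact pv_bad_extend u _ v (fun c hc => pv_space_side c (hu c hc)) (fun c hc => pv_space_side c (hv c hc)) h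

theorem pv_core_eq_strip (vrs fnc : List String) (m : List Char) :
    is_r_trivial_core vrs fnc (PySem.Chars.strip m) = is_r_trivial_core vrs fnc m := by
  conv_lhs => rw [is_r_trivial_core]
  conv_rhs => rw [is_r_trivial_core]
  rw [pv_strip_idem]

theorem pv_core_false_triv (vrs fnc : List String) (m : List Char)
    (h : is_r_trivial_core vrs fnc m = false) : pvTrivA vrs fnc (PySem.Chars.strip m) = false := by
  rw [is_r_trivial_core] at h
  by_cases hh : pvTrivA vrs fnc (PySem.Chars.strip m) = true
  · simp [hh] at h
  · simpa using hh

theorem pv_main (vrs fnc : List String) : ∀ (n : Nat) (l : List Char), l.length ≤ n → pvBad l = false →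
    is_r_trivial_core vrs fnc l = alt_loop vrs fnc (PySem.Chars.strip l) := by
  intro n
  induction n with
  | zero =>
    intro l hlen _
    have hl : l = [] := List.eq_nil_of_length_eq_zero (by omega)
    subst hl
    rw [is_r_trivial_core, alt_loop]
    simp [pvTrivA, pvTrivA, PySem.Chars.strip, PySem.Chars.lstrip, PySem.Chars.rstrip]
  | succ n ih =>
    intro l hlen hbad
    have hsl : PySem.Chars.strip (PySem.Chars.strip l) = PySem.Chars.strip l := pv_strip_idem l
    have hbadlin : pvBad (PySem.Chars.strip l) = false := by
      by_cases hh : pvBad (PySem.Chars.strip l) = true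
      · rw [pv_bad_strip l hh] at hbad; exact absurd hbad (by simp)
      · simpa using hh
    have hlinlen : (PySem.Chars.strip l).length ≤ n + 1 := le_trans (pv_strip_length_le l) hlen
    by_cases hT : pvTrivA vrs fnc (PySem.Chars.strip l) = true
    · rw [is_r_trivial_core, alt_loop]
      simp [hT]
    · have hTf : pvTrivA vrs fnc (PySem.Chars.strip l) = false := by simpa using hT
      have hne : PySem.Chars.strip l ≠ [] := by
        intro e; rw [e] at hTf; simp [pvTrivA] at hTf
      obtain ⟨c, t, hct⟩ := List.exists_cons_of_ne_nil hne
      have hget0 : PySem.List.pyGet? (PySem.Chars.strip l) 0 = some c := by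
        rw [hct]; exact PySem.List.pyGet?_zero_cons _ _
      have hgetm1 : PySem.List.pyGet? (PySem.Chars.strip l) (-1) = (PySem.Chars.strip l).getLast? :=
        PySem.List.pyGet?_neg_one _
      by_cases hp : c = '(' ∧ (PySem.Chars.strip l).getLast? = some ')'
      · -- outer parentheses: A recurses, B loops; both continue on lin[1:-1]
        obtain ⟨hpc, hpl⟩ := hp
        subst hpc
        have htne : t ≠ [] := by
          rintro rfl
          rw [hct] at hpl; simp at hpl
        have htl : t.getLast? = some ')' := by
          rw [hct, pv_getLast?_cons _ _ htne] at hpl; exact hpl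
        have htdec : t.dropLast ++ [')'] = t := List.dropLast_append_getLast? ')' htl
        have hmidlen : t.dropLast.length ≤ n := by
          have h1 : (PySem.Chars.strip l).length ≤ n + 1 := hlinlen
          rw [hct] at h1
          have h2 : t.dropLast.length = t.length - 1 := by simp
          simp at h1
          omega
        have hbadmid : pvBad t.dropLast = false := by
          by_cases hh : pvBad t.dropLast = true
          · exfalso
            have h2 : pvBad (PySem.Chars.strip l) = true := by
              rw [hct, ← htdec]
              have := pv_bad_extend ['('] t.dropLast [')']
                (by intro x hx; simp at hx; subst hx; exact ⟨by decide, by decide⟩)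
                (by intro x hx; simp at hx; subst hx; exact ⟨by decide, by decide⟩) hh
              simpa using this
            rw [h2] at hbadlin; exact absurd hbadlin (by simp)
          · simpa using hh
        have hIH := ih t.dropLast hmidlen hbadmid
        rw [is_r_trivial_core, alt_loop]
        simp only [hTf, Bool.false_eq_true, hget0]
        simp only [hct, pv_slice_cons, pv_startswith_cons, pv_endswith_getLast?,
          pv_getLast?_cons '(' t htne, htl, PySem.List.pyGet?_neg_one]
        simpa using hIH
      · -- no outer parentheses
        have htlen : t.length ≤ n := by
          have h1 : (PySem.Chars.strip l).length ≤ n + 1 := hlinlen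
          rw [hct] at h1; simp at h1; omega
        have hparen : (c == '(' && (PySem.List.pyGet? (PySem.Chars.strip l) (-1) == some ')')) = false := by
          rw [hgetm1]
          by_cases h1 : c = '('
          · subst h1
            simp only [beq_self_eq_true, Bool.true_and]
            exact beq_eq_false_iff_ne.mpr (fun he => hp ⟨rfl, he⟩)
          · simp [h1]
        have hparenB : (PySem.Chars.startswith (PySem.Chars.strip l) ['('] &&
            PySem.Chars.endswith (PySem.Chars.strip l) [')']) = false := by
          rw [hct, pv_startswith_cons, pv_endswith_getLast?, ← hct]
          by_cases h1 : c = '('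
          · subst h1
            simp only [beq_self_eq_true, Bool.true_and]
            exact beq_eq_false_iff_ne.mpr (fun he => hp ⟨rfl, he⟩)
          · simp [h1]
        rw [is_r_trivial_core, alt_loop]
        simp only [hTf, Bool.false_eq_true, dite_eq_ite, if_false, hget0, hparen,
          hparenB, Bool.false_eq_true]
        simp only [hct, pv_slice_one_none, List.drop_succ_cons, List.drop_zero, pv_startswith_cons]
        by_cases hcp : c = '+'
        · subst hcp
          have hbadt : pvBad t = false := by
            by_cases hh : pvBad t = true
            · exfalso
              have h2 : pvBad (PySem.Chars.strip l) = true := by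
                rw [hct]
                have := pv_bad_extend ['+'] t []
                  (by intro x hx; simp at hx; subst hx; exact ⟨by decide, by decide⟩)
                  (by intro x hx; simp at hx) hh
                simpa using this
              rw [h2] at hbadlin; exact absurd hbadlin (by simp)
            · simpa using hh
          have hIHt := ih t htlen hbadt
          have hcs : is_r_trivial_core vrs fnc (PySem.Chars.strip t) = is_r_trivial_core vrs fnc t :=
            pv_core_eq_strip vrs fnc t
          by_cases hrec : is_r_trivial_core vrs fnc t = true
          · simp [hcs, hrec, ← hIHt]
          · have hrecf : is_r_trivial_core vrs fnc t = false := by simpa using hrec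
            have hstf : is_r_trivial_core vrs fnc (PySem.Chars.strip t) = false := by rw [hcs, hrecf]
            have htrivf : pvTrivA vrs fnc (PySem.Chars.strip t) = false := pv_core_false_triv vrs fnc t hrecf
            have hnne : PySem.Chars.strip t ≠ [] := by
              intro e; rw [e] at htrivf; simp [pvTrivA] at htrivf
            obtain ⟨d, s2, hds⟩ := List.exists_cons_of_ne_nil hnne
            have hget0t : PySem.List.pyGet? (PySem.Chars.strip t) 0 = some d := by
              rw [hds]; exact PySem.List.pyGet?_zero_cons _ _
            by_cases hq : d = '(' ∧ (PySem.Chars.strip t).getLast? = some ')'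
            · have hcond : (d == '(' && PySem.List.pyGet? (PySem.Chars.strip t) (-1) == some ')') = true := by
                rw [PySem.List.pyGet?_neg_one, hq.2]; simp [hq.1]
              have hstf2 := hstf
              rw [is_r_trivial_core] at hstf2
              simp only [pv_strip_idem, htrivf, Bool.false_eq_true, dite_eq_ite, if_false, hget0t,
                hcond, if_true] at hstf2
              have h3 := pv_core_false_triv vrs fnc _ hstf2
              simp [hstf, hget0t, hcond, h3, hrecf, ← hIHt]
            · have hcond : (d == '(' && PySem.List.pyGet? (PySem.Chars.strip t) (-1) == some ')') = false := by
                rw [PySem.List.pyGet?_neg_one]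
                by_cases h1 : d = '('
                · subst h1
                  simp only [beq_self_eq_true, Bool.true_and]
                  exact beq_eq_false_iff_ne.mpr (fun he => hq ⟨rfl, he⟩)
                · simp [h1]
              simp [hstf, hget0t, hcond, htrivf, hrecf, ← hIHt]
        · by_cases hcm : c = '-'
          · subst hcm
            have htne2 : t ≠ [] := by
              rintro rfl
              rw [hct] at hbadlin
              exact absurd hbadlin (by decide)
            obtain ⟨e, hgl⟩ : ∃ e, (PySem.Chars.strip l).getLast? = some e := by
              cases hgl : (PySem.Chars.strip l).getLast? with
              | none => exact absurd (List.getLast?_eq_none_iff.mp hgl) hne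
              | some e => exact ⟨e, rfl⟩
            have hesp : PySem.Chars.isspace e = false := pv_strip_getLast?_not l e hgl
            have hgt : t.getLast? = some e := by
              rw [hct, pv_getLast?_cons _ _ htne2] at hgl; exact hgl
            have hnne : PySem.Chars.strip t ≠ [] := pv_strip_ne_nil t e hgt hesp
            have hnemp : (PySem.Chars.strip t).isEmpty = false := by
              simpa [List.isEmpty_iff] using hnne
            obtain ⟨d, s2, hds⟩ := List.exists_cons_of_ne_nil hnne
            have hget0t : PySem.List.pyGet? (PySem.Chars.strip t) 0 = some d := by
              rw [hds]; exact PySem.List.pyGet?_zero_cons _ _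
            have hswA : PySem.Chars.startswith (PySem.Chars.strip t) ['('] = (d == '(') := by
              rw [hds, pv_startswith_cons]
            have hewA : PySem.Chars.endswith (PySem.Chars.strip t) [')'] =
                ((PySem.Chars.strip t).getLast? == some ')') := pv_endswith_getLast? _ _
            simp only [hget0t, hnemp, hswA, hewA, PySem.List.pyGet?_neg_one]
            by_cases hC : (d == '(' && (PySem.Chars.strip t).getLast? == some ')') = true
            · simp [hC, pvOPERATORS]
            · have hCf : (d == '(' && (PySem.Chars.strip t).getLast? == some ')') = false := by
                simpa using hC
              simp [hCf, pvOPERATORS]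
          · simp [hcp, hcm, pvOPERATORS]


-- ===== VERDICT (by name: the statement is the Claim_ definition above) =====
theorem is_r_trivial_spec : Claim_equal_is_r_trivial := by
  intro lb vrs fnc _hdom hpre
  unfold Spec_is_r_trivial is_r_trivial is_r_trivial_alt
  exact pv_main vrs fnc lb.toList.length lb.toList le_rfl hpre
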